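-- pv_equiv track=rewrite | github.com/fforlani/CS50 | ai/lecture 0 - Search/tictactoe/tictactoe.py | countNumberOfMoves
-- ===== SOURCE A (Python) =====
-- X = "X"
--
-- O = "O"
--
-- def countNumberOfMoves(board):
--     x = 0
--     o = 0
--     for row in board:
--         for cell in row:
--             if cell == X:
--                 x += 1
--             elif cell == O:
--                 o += 1
--     return x, o
-- ===== SOURCE B (Python) =====
-- X = "X"
--
-- O = "O"
--
-- def countNumberOfMoves(board):
--     flat = [cell for row in board for cell in row]
--
--     def go(cells):
--         if len(cells) == 0:
--             return 0, 0
--         if len(cells) == 1: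
--             c = cells[0]
--             if c == X:
--                 return 1, 0
--             if c == O:
--                 return 0, 1
--             return 0, 0
--         mid = len(cells) // 2
--         xl, ol = go(cells[:mid])
--         xr, oright = go(cells[mid:])
--         return xl + xr, ol + oright
--
--     return go(flat)
-- ===== Notes on version B (the rewrite author's own statement) =====
-- stated objective: alternative
-- what changed: Replaces the iterative nested-loop accumulation of two counters with a divide-and-conquer recursion that flattens the board, splits the cell list in half, recursively counts each half and adds the pair results.
import Mathlib
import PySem

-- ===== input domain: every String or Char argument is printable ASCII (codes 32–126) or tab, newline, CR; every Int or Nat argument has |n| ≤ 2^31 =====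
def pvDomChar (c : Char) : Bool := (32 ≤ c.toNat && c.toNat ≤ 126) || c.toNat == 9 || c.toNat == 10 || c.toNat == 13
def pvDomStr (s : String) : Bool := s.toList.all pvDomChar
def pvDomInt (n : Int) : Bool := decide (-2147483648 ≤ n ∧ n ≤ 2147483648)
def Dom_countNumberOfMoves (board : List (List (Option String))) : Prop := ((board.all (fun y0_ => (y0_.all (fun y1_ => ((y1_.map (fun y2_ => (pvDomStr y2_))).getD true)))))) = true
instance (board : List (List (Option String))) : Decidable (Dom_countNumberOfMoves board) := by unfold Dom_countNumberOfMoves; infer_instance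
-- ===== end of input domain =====

-- B counts by divide-and-conquer over the flattened cell list instead of A's nested-loop twin accumulators (alternative; same cost).


-- ===== PORT A =====
def countNumberOfMoves (board : List (List (Option String))) : Int × Int :=
  board.foldl (fun (s : Int × Int) row =>
    row.foldl (fun (s : Int × Int) cell =>
      if cell = some "X" then (s.1 + 1, s.2)
      else if cell = some "O" then (s.1, s.2 + 1)
      else s) s) (0, 0)

-- ===== PORT B =====
-- go(cells): divide-and-conquer count; cells[:mid]/cells[mid:] with 0 ≤ mid ≤ len are exactly take/drop.
def pvGoCount (cells : List (Option String)) : Int × Int :=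
  if cells.length = 0 then (0, 0)
  else if _h1 : cells.length = 1 then
    match PySem.List.pyGet? cells 0 with
    | some c => if c = some "X" then (1, 0) else if c = some "O" then (0, 1) else (0, 0)
    | none => (0, 0)  -- unreachable: length = 1
  else
    let mid := cells.length / 2
    let l := pvGoCount (cells.take mid)
    let r := pvGoCount (cells.drop mid)
    (l.1 + r.1, l.2 + r.2)
termination_by cells.length
decreasing_by
  · simp [List.length_take]; omega
  · simp [List.length_drop]; omega

def countNumberOfMoves_alt (board : List (List (Option String))) : Int × Int :=
  let flat := board.flatMap (fun row => row)
  pvGoCount flat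

-- ===== PRECONDITION & SPEC =====
def Spec_countNumberOfMoves (board : List (List (Option String))) (out : Int × Int) : Prop := out = countNumberOfMoves_alt board
instance (board : List (List (Option String))) (out : Int × Int) : Decidable (Spec_countNumberOfMoves board out) := by unfold Spec_countNumberOfMoves; infer_instance

-- ===== CLAIM (what is proved, stated in full; the proofs are below) =====
def Claim_equal_countNumberOfMoves : Prop := ∀ (board : List (List (Option String))), Dom_countNumberOfMoves board → Spec_countNumberOfMoves board (countNumberOfMoves board)

-- ===== LEMMAS AND PROOFS =====

theorem pvGoCount_eq (cells : List (Option String)) :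
    pvGoCount cells = ((cells.count (some "X") : Int), (cells.count (some "O") : Int)) := by
  fun_induction pvGoCount cells with
  | case1 cells h0 => simp_all [List.length_eq_zero_iff]
  | case6 cells h0 h1 mid l r iht ihd =>
    simp only [mid, l, r, iht, ihd]
    have hsplit := List.take_append_drop (cells.length / 2) cells
    have hx : (cells.take (cells.length / 2)).count (some "X")
        + (cells.drop (cells.length / 2)).count (some "X") = cells.count (some "X") := by
      rw [← List.count_append, hsplit]
    have ho : (cells.take (cells.length / 2)).count (some "O")
        + (cells.drop (cells.length / 2)).count (some "O") = cells.count (some "O") := by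
      rw [← List.count_append, hsplit]
    simp only [Prod.mk.injEq]
    constructor <;> push_cast [← hx, ← ho] <;> ring
  | _ =>
    obtain ⟨x, rfl⟩ := List.length_eq_one_iff.mp ‹List.length _ = 1›
    simp_all [PySem.List.pyGet?, PySem.List.pyIdx?]

theorem row_foldl_eq (row : List (Option String)) (s : Int × Int) :
    row.foldl (fun (s : Int × Int) cell =>
      if cell = some "X" then (s.1 + 1, s.2)
      else if cell = some "O" then (s.1, s.2 + 1)
      else s) s
    = (s.1 + row.count (some "X"), s.2 + row.count (some "O")) := by
  induction row generalizing s with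
  | nil => simp
  | cons c cs ih =>
    simp only [List.foldl_cons, ih, List.count_cons]
    split_ifs with h1 h2 <;> simp_all <;> ring_nf

theorem board_foldl_eq (board : List (List (Option String))) (s : Int × Int) :
    board.foldl (fun (s : Int × Int) row =>
      row.foldl (fun (s : Int × Int) cell =>
        if cell = some "X" then (s.1 + 1, s.2)
        else if cell = some "O" then (s.1, s.2 + 1)
        else s) s) s
    = (s.1 + (board.flatMap (fun row => row)).count (some "X"),
       s.2 + (board.flatMap (fun row => row)).count (some "O")) := by
  induction board generalizing s with
  | nil => simp
  | cons r rs ih =>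
    rw [List.foldl_cons, row_foldl_eq, ih]
    simp only [List.flatMap_cons, List.count_append, Prod.mk.injEq]
    push_cast
    constructor <;> ring

-- ===== VERDICT (by name: the statement is the Claim_ definition above) =====
theorem countNumberOfMoves_spec : Claim_equal_countNumberOfMoves := by
  intro board _
  unfold Spec_countNumberOfMoves countNumberOfMoves countNumberOfMoves_alt
  rw [board_foldl_eq, pvGoCount_eq]
  simp
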